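-- pv_equiv track=rewrite | github.com/openthinklabs/Tangent | tangent_code/tangent/ranking/ranking_functions.py | compute_leftmost_scores
-- ===== SOURCE A (Python) =====
-- def compute_leftmost_scores(location, max_depth, n_types, c_type):
--     match_score = [0] * max_depth
--
--     current_depth = 0
--     loc_pos = 0
--     baseline_pos = 0
--     while loc_pos < len(location) and current_depth < max_depth:
--         if location[loc_pos] == "n":
--             baseline_pos += 1
--         else:
--             # change of baseline, write current, reset next
--             match_score[current_depth] = -(baseline_pos * (n_types + 1) + n_types)
--
--             baseline_pos = 0
--             current_depth += 1
--
--         loc_pos += 1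
--
--     if current_depth < max_depth:
--         # write current score ...
--         match_score[current_depth] = -(baseline_pos * (n_types + 1) + c_type)
--
--     return match_score
-- ===== SOURCE B (Python) =====
-- def compute_leftmost_scores(location, max_depth, n_types, c_type):
--     # Segment-table formulation: the 'n'-run lengths are differences of
--     # consecutive delimiter positions; then fill the score array by index.
--     bounds = [-1] + [i for i, c in enumerate(location) if c != 'n'] + [len(location)]
--     lens = [b - a - 1 for a, b in zip(bounds, bounds[1:])]
--     completed = min(len(lens) - 1, max_depth)
--     match_score = [0] * max_depth
--     for i in range(completed):
--         match_score[i] = -(lens[i] * (n_types + 1) + n_types)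
--     if completed < max_depth:
--         match_score[completed] = -(lens[completed] * (n_types + 1) + c_type)
--     return match_score
-- ===== Notes on version B (the rewrite author's own statement) =====
-- stated objective: alternative
-- what changed: Replaces A's stateful scan-and-flush loop (depth/baseline counters mutated per character) with a declarative pipeline: delimiter positions via enumerate, run lengths as differences of consecutive bounds via zip, then an indexed fill of the score table.
import Mathlib
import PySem

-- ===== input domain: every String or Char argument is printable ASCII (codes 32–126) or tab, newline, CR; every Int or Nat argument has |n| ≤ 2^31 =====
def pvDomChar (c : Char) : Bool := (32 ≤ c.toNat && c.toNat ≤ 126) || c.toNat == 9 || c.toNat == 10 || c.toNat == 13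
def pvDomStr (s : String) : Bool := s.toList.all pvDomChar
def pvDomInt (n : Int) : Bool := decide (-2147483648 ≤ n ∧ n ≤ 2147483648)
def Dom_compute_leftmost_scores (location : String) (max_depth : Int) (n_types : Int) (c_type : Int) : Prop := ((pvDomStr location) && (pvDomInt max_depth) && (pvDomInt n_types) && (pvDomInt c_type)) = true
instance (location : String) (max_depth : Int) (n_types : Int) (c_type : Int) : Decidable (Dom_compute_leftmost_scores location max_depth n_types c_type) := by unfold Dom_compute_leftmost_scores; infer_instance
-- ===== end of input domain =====

-- B replaces A's stateful scan-and-flush loop with a declarative pipeline: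
-- delimiter positions, run lengths as differences of consecutive bounds, then an indexed fill.
-- Equivalence of the RETURN values is proved for all inputs (both programs are total).

-- ===== PORT A =====
-- the while loop: state (match_score, current_depth, baseline_pos); loc_pos walks the string
def compute_leftmost_scores_loop (md : Int) (nt : Int) : List Char → List Int → Int → Int → List Int × Int × Int
  | [], ms, depth, base => (ms, depth, base)
  | c :: rest, ms, depth, base =>
    if depth < md then
      if c = 'n' then
        compute_leftmost_scores_loop md nt rest ms depth (base + 1)
      else
        compute_leftmost_scores_loop md nt rest
          (PySem.List.pySetD ms depth (-(base * (nt + 1) + nt))) (depth + 1) 0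
    else (ms, depth, base)

def compute_leftmost_scores (location : String) (max_depth : Int) (n_types : Int) (c_type : Int) : List Int :=
  -- [0] * max_depth (empty list for max_depth ≤ 0, as in Python)
  let ms0 : List Int := List.replicate max_depth.toNat 0
  let r := compute_leftmost_scores_loop max_depth n_types location.toList ms0 0 0
  if r.2.1 < max_depth then
    PySem.List.pySetD r.1 r.2.1 (-(r.2.2 * (n_types + 1) + c_type))
  else r.1

-- ===== PORT B =====
def compute_leftmost_scores_alt (location : String) (max_depth : Int) (n_types : Int) (c_type : Int) : List Int :=
  let cs := location.toList
  -- bounds = [-1] + [i for i, c in enumerate(location) if c != 'n'] + [len(location)]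
  let bounds : List Int :=
    [(-1 : Int)] ++ ((PySem.List.enumerate cs 0).filter (fun p => p.2 ≠ 'n')).map (fun p => p.1)
      ++ [(cs.length : Int)]
  -- lens = [b - a - 1 for a, b in zip(bounds, bounds[1:])]
  let lens : List Int :=
    (List.zip bounds (PySem.List.slice bounds (some 1) none)).map (fun p => p.2 - p.1 - 1)
  let completed : Int := min ((lens.length : Int) - 1) max_depth
  let ms0 : List Int := List.replicate max_depth.toNat 0
  let ms1 := (PySem.List.pyRange 0 completed 1).foldl
    (fun ms i => PySem.List.pySetD ms i (-(PySem.List.pyGetD lens i 0 * (n_types + 1) + n_types))) ms0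
  if completed < max_depth then
    PySem.List.pySetD ms1 completed (-(PySem.List.pyGetD lens completed 0 * (n_types + 1) + c_type))
  else ms1

-- ===== PRECONDITION & SPEC =====
def Spec_compute_leftmost_scores (location : String) (max_depth : Int) (n_types : Int) (c_type : Int) (out : List Int) : Prop := out = compute_leftmost_scores_alt location max_depth n_types c_type
instance (location : String) (max_depth : Int) (n_types : Int) (c_type : Int) (out : List Int) : Decidable (Spec_compute_leftmost_scores location max_depth n_types c_type out) := by unfold Spec_compute_leftmost_scores; infer_instance

-- ===== CLAIM (what is proved, stated in full; the proofs are below) =====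
def Claim_equal_compute_leftmost_scores : Prop := ∀ (location : String) (max_depth : Int) (n_types : Int) (c_type : Int), Dom_compute_leftmost_scores location max_depth n_types c_type → Spec_compute_leftmost_scores location max_depth n_types c_type (compute_leftmost_scores location max_depth n_types c_type)

-- ===== LEMMAS AND PROOFS =====

-- lengths of the maximal runs of 'n' in cs, delimited by every non-'n' character
def pvRunLens : List Char → List Int
  | [] => [0]
  | c :: rest =>
    if c = 'n' then
      match pvRunLens rest with
      | [] => [1]
      | h :: t => (h + 1) :: t
    else 0 :: pvRunLens rest

-- indices (from k) of the non-'n' characters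
def pvSepIdx : List Char → Int → List Int
  | [], _ => []
  | c :: rest, k => if c = 'n' then pvSepIdx rest (k + 1) else k :: pvSepIdx rest (k + 1)

-- canonical writer: writes lens at positions d, d+1, … (nt-score except ct-score for the last), stopping at md
def pvAW (md : Int) (nt : Int) (ct : Int) : List Int → List Int → Int → List Int
  | ms, [], _ => ms
  | ms, [l], d => if d < md then PySem.List.pySetD ms d (-(l * (nt + 1) + ct)) else ms
  | ms, l :: l2 :: rest, d =>
    if d < md then pvAW md nt ct (PySem.List.pySetD ms d (-(l * (nt + 1) + nt))) (l2 :: rest) (d + 1)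
    else ms

def pvWithBase (base : Int) : List Int → List Int
  | [] => []
  | h :: t => (base + h) :: t

theorem pvRunLens_ne_nil (cs : List Char) : pvRunLens cs ≠ [] := by
  induction cs with
  | nil => simp [pvRunLens]
  | cons c rest ih =>
    unfold pvRunLens
    split_ifs
    · rcases pvRunLens rest with _ | ⟨h, t⟩ <;> simp
    · simp

theorem pvEnum_filter_eq_sepIdx (cs : List Char) (k : Int) :
    ((PySem.List.enumerate cs k).filter (fun p => p.2 ≠ 'n')).map (fun p => p.1) = pvSepIdx cs k := by
  induction cs generalizing k with
  | nil => simp [PySem.List.enumerate_nil, pvSepIdx]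
  | cons c rest ih =>
    by_cases hc : c = 'n' <;>
      simpa [PySem.List.enumerate_cons, pvSepIdx, List.filter, hc] using ih (k + 1)

theorem pvDiffs_eq_runLens (cs : List Char) (a : Int) :
    (List.zip (a :: (pvSepIdx cs (a + 1) ++ [a + 1 + cs.length]))
      (pvSepIdx cs (a + 1) ++ [a + 1 + cs.length])).map (fun p => p.2 - p.1 - 1) = pvRunLens cs := by
  induction cs generalizing a with
  | nil => simp [pvSepIdx, pvRunLens]
  | cons c rest ih =>
    by_cases hc : c = 'n'
    · subst hc
      have hend : a + 1 + (('n' :: rest).length : Int) = (a + 1) + 1 + (rest.length : Int) := by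
        simp only [List.length_cons]; push_cast; ring
      rw [hend]
      have hsep : pvSepIdx ('n' :: rest) (a + 1) = pvSepIdx rest (a + 1 + 1) := by
        simp [pvSepIdx]
      rw [hsep]
      obtain ⟨l0, L', hL⟩ : ∃ l0 L',
          pvSepIdx rest (a + 1 + 1) ++ [a + 1 + 1 + (rest.length : Int)] = l0 :: L' := by
        cases pvSepIdx rest (a + 1 + 1) <;> exact ⟨_, _, rfl⟩
      have ihr := ih (a + 1)
      rw [hL] at ihr ⊢
      rcases hrl : pvRunLens rest with _ | ⟨h, t⟩
      · exact absurd hrl (pvRunLens_ne_nil rest)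
      · rw [hrl] at ihr
        simp only [List.zip_cons_cons, List.map_cons] at ihr ⊢
        obtain ⟨h1, h2⟩ := List.cons.injEq _ _ _ _ ▸ ihr
        have hrn : pvRunLens ('n' :: rest) = (h + 1) :: t := by
          simp [pvRunLens, hrl]
        rw [hrn, h2]
        congr 1
        omega
    · have hend : a + 1 + ((c :: rest).length : Int) = (a + 1) + 1 + (rest.length : Int) := by
        simp only [List.length_cons]; push_cast; ring
      rw [hend]
      have hsep : pvSepIdx (c :: rest) (a + 1) = (a + 1) :: pvSepIdx rest (a + 1 + 1) := by
        simp [pvSepIdx, hc]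
      rw [hsep]
      have hrn : pvRunLens (c :: rest) = 0 :: pvRunLens rest := by
        simp [pvRunLens, hc]
      rw [hrn]
      simp only [List.cons_append, List.zip_cons_cons, List.map_cons]
      rw [ih (a + 1)]
      congr 1
      omega

theorem pvAW_length (md nt ct : Int) (lens : List Int) (ms : List Int) (d : Int) :
    (pvAW md nt ct ms lens d).length = ms.length := by
  fun_induction pvAW <;> simp_all [PySem.List.length_pySetD]

theorem pvAW_stop (md nt ct : Int) (lens : List Int) (ms : List Int) (d : Int)
    (hne : lens ≠ []) (hd : ¬ d < md) : pvAW md nt ct ms lens d = ms := by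
  rcases lens with _ | ⟨l, _ | ⟨l2, rest⟩⟩
  · exact absurd rfl hne
  · simp [pvAW, hd]
  · simp [pvAW, hd]

-- A's loop followed by the final conditional write equals the canonical writer
theorem pvLoopA_eq_AW (md nt ct : Int) (cs : List Char) :
    ∀ (ms : List Int) (depth base : Int),
    (if (compute_leftmost_scores_loop md nt cs ms depth base).2.1 < md then
      PySem.List.pySetD (compute_leftmost_scores_loop md nt cs ms depth base).1
        (compute_leftmost_scores_loop md nt cs ms depth base).2.1
        (-((compute_leftmost_scores_loop md nt cs ms depth base).2.2 * (nt + 1) + ct))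
    else (compute_leftmost_scores_loop md nt cs ms depth base).1)
    = pvAW md nt ct ms (pvWithBase base (pvRunLens cs)) depth := by
  induction cs with
  | nil =>
    intro ms depth base
    simp only [compute_leftmost_scores_loop, pvRunLens, pvWithBase, pvAW]
    norm_num
  | cons c rest ih =>
    intro ms depth base
    by_cases hd : depth < md
    · by_cases hc : c = 'n'
      · subst hc
        have hstep : compute_leftmost_scores_loop md nt ('n' :: rest) ms depth base
            = compute_leftmost_scores_loop md nt rest ms depth (base + 1) := by
          simp [compute_leftmost_scores_loop, hd]
        rw [hstep, ih ms depth (base + 1)]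
        rcases hrl : pvRunLens rest with _ | ⟨h, t⟩
        · exact absurd hrl (pvRunLens_ne_nil rest)
        · have hrn : pvRunLens ('n' :: rest) = (h + 1) :: t := by
            simp [pvRunLens, hrl]
          rw [hrn]
          simp only [pvWithBase]
          congr 2
          ring
      · have hstep : compute_leftmost_scores_loop md nt (c :: rest) ms depth base
            = compute_leftmost_scores_loop md nt rest
                (PySem.List.pySetD ms depth (-(base * (nt + 1) + nt))) (depth + 1) 0 := by
          simp [compute_leftmost_scores_loop, hd, hc]
        rw [hstep, ih _ (depth + 1) 0]
        have hrn : pvRunLens (c :: rest) = 0 :: pvRunLens rest := by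
          simp [pvRunLens, hc]
        rw [hrn]
        rcases hrl : pvRunLens rest with _ | ⟨h, t⟩
        · exact absurd hrl (pvRunLens_ne_nil rest)
        · simp only [pvWithBase, pvAW, if_pos hd]
          congr 2 <;> ring
    · have hstep : compute_leftmost_scores_loop md nt (c :: rest) ms depth base
          = (ms, depth, base) := by
        simp [compute_leftmost_scores_loop, hd]
      rw [hstep, pvAW_stop md nt ct _ ms depth _ hd]
      · simp [hd]
      · rcases hrl : pvRunLens (c :: rest) with _ | ⟨h, t⟩
        · exact absurd hrl (pvRunLens_ne_nil _)
        · simp [pvWithBase]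

-- pointwise value of the canonical writer
theorem pvAW_getD (md nt ct : Int) (lens : List Int) :
    ∀ (d : Nat) (ms : List Int), ms.length = md.toNat → ∀ (j : Nat),
    PySem.List.pyGetD (pvAW md nt ct ms lens (d : Int)) (j : Int) 0 =
      if d ≤ j ∧ (j : Int) < md ∧ j + 1 < d + lens.length then
        -(lens.getD (j - d) 0 * (nt + 1) + nt)
      else if d ≤ j ∧ (j : Int) < md ∧ j + 1 = d + lens.length then
        -(lens.getD (j - d) 0 * (nt + 1) + ct)
      else PySem.List.pyGetD ms (j : Int) 0 := by
  induction lens with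
  | nil =>
    intro d ms _ j
    have h1 : ¬ (d ≤ j ∧ (j : Int) < md ∧ j + 1 < d + List.length ([] : List Int)) := by
      simp; omega
    have h2 : ¬ (d ≤ j ∧ (j : Int) < md ∧ j + 1 = d + List.length ([] : List Int)) := by
      simp; omega
    rw [if_neg h1, if_neg h2]
    rfl
  | cons l rest ih =>
    intro d ms hms j
    rcases rest with _ | ⟨l2, rest'⟩
    · -- lens = [l]
      simp only [pvAW]
      by_cases hd : (d : Int) < md
      · rw [if_pos hd]
        have hdlt : d < ms.length := by omega
        rw [PySem.List.pyGetD_pySetD_natCast ms d j _ _ hdlt]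
        by_cases hj : j = d
        · subst hj
          rw [if_pos rfl, if_neg (by simp), if_pos (by simp; omega)]
          simp
        · rw [if_neg hj, if_neg (by simp; omega), if_neg (by simp; omega)]
      · rw [if_neg hd, if_neg (by simp; omega), if_neg (by simp; omega)]
    · -- lens = l :: l2 :: rest'
      simp only [pvAW]
      by_cases hd : (d : Int) < md
      · rw [if_pos hd]
        have hdlt : d < ms.length := by omega
        have hlen : (PySem.List.pySetD ms (d : Int) (-(l * (nt + 1) + nt))).length = md.toNat := by
          rw [PySem.List.length_pySetD]; exact hms
        have hcast : ((d : Int) + 1) = ((d + 1 : Nat) : Int) := by push_cast; ring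
        rw [hcast, ih (d + 1) _ hlen j]
        rw [PySem.List.pyGetD_pySetD_natCast ms d j _ _ hdlt]
        by_cases hj1 : j = d
        · subst hj1
          rw [if_neg (by omega), if_neg (by omega), if_pos rfl,
            if_pos (by refine ⟨by omega, by omega, by simp⟩)]
          simp
        · rw [if_neg hj1]
          by_cases hj2 : d + 1 ≤ j
          · have hsub : j - d = (j - (d + 1)) + 1 := by omega
            have hget : (l :: l2 :: rest').getD (j - d) 0 = (l2 :: rest').getD (j - (d + 1)) 0 := by
              rw [hsub]; rfl
            rw [hget]
            by_cases hA : (j : Int) < md ∧ j + 1 < (d + 1) + List.length (l2 :: rest')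
            · rw [if_pos ⟨hj2, hA.1, hA.2⟩, if_pos (by simp at hA ⊢; omega)]
            · rw [if_neg (by tauto)]
              by_cases hB : (j : Int) < md ∧ j + 1 = (d + 1) + List.length (l2 :: rest')
              · rw [if_pos ⟨hj2, hB.1, hB.2⟩, if_neg (by simp at hA ⊢; omega),
                  if_pos (by simp at hB ⊢; omega)]
              · rw [if_neg (by tauto), if_neg (by simp at hA ⊢; omega), if_neg (by simp at hB ⊢; omega)]
          · rw [if_neg (by omega), if_neg (by omega), if_neg (by omega), if_neg (by omega)]
      · rw [if_neg hd, if_neg (by omega), if_neg (by omega)]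

theorem pvFold_length (nt : Int) (lens : List Int) (rng : List Int) (ms : List Int) :
    ((rng.foldl (fun ms i => PySem.List.pySetD ms i (-(PySem.List.pyGetD lens i 0 * (nt + 1) + nt))) ms)).length = ms.length := by
  induction rng generalizing ms with
  | nil => rfl
  | cons i rng ih => rw [List.foldl_cons, ih, PySem.List.length_pySetD]

-- pointwise value of B's indexed fill loop
theorem pvFold_getD (md nt : Int) (lens : List Int) (c : Nat) (hc : (c : Int) ≤ md) :
    ∀ (ms : List Int), ms.length = md.toNat → ∀ (j : Nat),
    PySem.List.pyGetD ((PySem.List.pyRange 0 (c : Int) 1).foldl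
        (fun ms i => PySem.List.pySetD ms i (-(PySem.List.pyGetD lens i 0 * (nt + 1) + nt))) ms) (j : Int) 0 =
      if j < c then -(lens.getD j 0 * (nt + 1) + nt) else PySem.List.pyGetD ms (j : Int) 0 := by
  induction c with
  | zero =>
    intro ms _ j
    rw [PySem.List.pyRange_one_eq_nil (by norm_num)]
    simp
  | succ c ih =>
    intro ms hms j
    have hc' : (c : Int) ≤ md := by push_cast at hc ⊢; omega
    have hcast : ((c + 1 : Nat) : Int) = (c : Int) + 1 := by push_cast; ring
    rw [hcast, PySem.List.pyRange_one_succ_right (by positivity), List.foldl_append]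
    simp only [List.foldl_cons, List.foldl_nil]
    have hflen : ((PySem.List.pyRange 0 (c : Int) 1).foldl
        (fun ms i => PySem.List.pySetD ms i (-(PySem.List.pyGetD lens i 0 * (nt + 1) + nt))) ms).length
        = md.toNat := by
      rw [pvFold_length]; exact hms
    have hclt : c < ((PySem.List.pyRange 0 (c : Int) 1).foldl
        (fun ms i => PySem.List.pySetD ms i (-(PySem.List.pyGetD lens i 0 * (nt + 1) + nt))) ms).length := by
      omega
    rw [PySem.List.pyGetD_pySetD_natCast _ c j _ _ hclt]
    by_cases hj : j = c
    · subst hj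
      rw [if_pos rfl, if_pos (by omega)]
      rw [PySem.List.pyGetD_natCast]
    · rw [if_neg hj, ih hc' ms hms j]
      by_cases hjc : j < c
      · rw [if_pos hjc, if_pos (by omega)]
      · rw [if_neg hjc, if_neg (by omega)]

-- ===== VERDICT (by name: the statement is the Claim_ definition above) =====
-- pyGetD on the all-zero initial table is 0
theorem pvRep0_getD (n : Nat) (j : Nat) :
    PySem.List.pyGetD (List.replicate n (0 : Int)) (j : Int) 0 = 0 := by
  rw [PySem.List.pyGetD_natCast]
  simp [List.getD, List.getElem?_replicate]
  split <;> rfl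

theorem pvWithBase_zero (l : List Int) : pvWithBase 0 l = l := by
  rcases l with _ | ⟨h, t⟩ <;> simp [pvWithBase]

theorem compute_leftmost_scores_spec : Claim_equal_compute_leftmost_scores := by
  intro location md nt ct _
  unfold Spec_compute_leftmost_scores
  simp only [compute_leftmost_scores, compute_leftmost_scores_alt]
  set cs := location.toList with hcs
  set rl := pvRunLens cs with hrl
  -- B's lens pipeline computes pvRunLens cs
  have hlens :
      (List.zip ([(-1 : Int)] ++ ((PySem.List.enumerate cs 0).filter (fun p => p.2 ≠ 'n')).map (fun p => p.1) ++ [(cs.length : Int)])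
        (PySem.List.slice ([(-1 : Int)] ++ ((PySem.List.enumerate cs 0).filter (fun p => p.2 ≠ 'n')).map (fun p => p.1) ++ [(cs.length : Int)]) (some 1) none)).map
        (fun p => p.2 - p.1 - 1) = rl := by
    rw [PySem.List.slice_from_one, pvEnum_filter_eq_sepIdx cs 0]
    have h0 : (0 : Int) = -1 + 1 := by norm_num
    have hE : (cs.length : Int) = -1 + 1 + (cs.length : Int) := by ring
    rw [h0, hE]
    simpa using pvDiffs_eq_runLens cs (-1)
  rw [hlens]
  -- A's scan equals the canonical writer on pvRunLens cs
  rw [pvLoopA_eq_AW md nt ct cs (List.replicate md.toNat 0) 0 0, pvWithBase_zero]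
  -- compare the two sides pointwise
  have hL : 1 ≤ rl.length := by
    rcases hr : rl with _ | _
    · exact absurd hr (pvRunLens_ne_nil cs)
    · simp
  have hmsl : (List.replicate md.toNat (0 : Int)).length = md.toNat := by simp
  have hAlen : (pvAW md nt ct (List.replicate md.toNat 0) rl 0).length = md.toNat := by
    rw [pvAW_length]; exact hmsl
  have hfoldlen : ∀ (z : Int),
      ((PySem.List.pyRange 0 z 1).foldl
        (fun ms i => PySem.List.pySetD ms i (-(PySem.List.pyGetD rl i 0 * (nt + 1) + nt)))
        (List.replicate md.toNat 0)).length = md.toNat := by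
    intro z; rw [pvFold_length]; exact hmsl
  apply List.ext_getElem
  · rw [hAlen]
    split
    · rw [PySem.List.length_pySetD, hfoldlen]
    · rw [hfoldlen]
  · intro j hj1 hj2
    rw [hAlen] at hj1
    have hjmd : (j : Int) < md := by omega
    have hc0 : (0 : Int) ≤ min ((rl.length : Int) - 1) md := by omega
    obtain ⟨c, hcc⟩ : ∃ c : Nat, (c : Int) = min ((rl.length : Int) - 1) md :=
      ⟨_, Int.toNat_of_nonneg hc0⟩
    rw [← List.getD_eq_getElem _ 0, ← List.getD_eq_getElem _ 0,
      ← PySem.List.pyGetD_natCast, ← PySem.List.pyGetD_natCast]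
    -- A side pointwise
    have hA := pvAW_getD md nt ct rl 0 (List.replicate md.toNat 0) hmsl j
    simp only [Nat.cast_zero, Nat.sub_zero, Nat.zero_add, Nat.zero_le, true_and] at hA
    rw [hA, pvRep0_getD]
    -- fold the completed counter into ↑c on the B side
    rw [← hcc]
    have hcmd : (c : Int) ≤ md := by omega
    have hB := pvFold_getD md nt rl c hcmd (List.replicate md.toNat 0) hmsl j
    by_cases hlt : (c : Int) < md
    · rw [if_pos hlt]
      have hclen : c < ((PySem.List.pyRange 0 (c : Int) 1).foldl
          (fun ms i => PySem.List.pySetD ms i (-(PySem.List.pyGetD rl i 0 * (nt + 1) + nt)))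
          (List.replicate md.toNat 0)).length := by
        rw [hfoldlen]; omega
      rw [PySem.List.pyGetD_pySetD_natCast _ c j _ _ hclen, hB,
        PySem.List.pyGetD_natCast, pvRep0_getD]
      have hcL : (c : Int) = (rl.length : Int) - 1 := by omega
      by_cases hj : j = c
      · subst hj
        rw [if_pos rfl, if_neg (by omega), if_pos (by refine ⟨hjmd, by omega⟩)]
      · rw [if_neg hj]
        by_cases hjc : j < c
        · rw [if_pos hjc, if_pos (by refine ⟨hjmd, by omega⟩)]
        · rw [if_neg hjc, if_neg (by omega), if_neg (by omega)]
    · rw [if_neg hlt, hB, pvRep0_getD]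
      have hjc : j < c := by omega
      rw [if_pos hjc, if_pos (by refine ⟨hjmd, by omega⟩)]
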